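-- pv_equiv track=rewrite | github.com/gursahani/algorithms_in_python | recursion/house_burglar.py | max_theft
-- ===== SOURCE A (Python) =====
-- def max_theft(nums):
--     max_dollar, maxSum = 0,0
--     for i in range(0,len(nums)):
--         if max_dollar < nums[i]:
--             max_dollar = nums[i]
--             i += 1
--             maxSum += max_dollar
--
--     return maxSum
-- ===== SOURCE B (Python) =====
-- def max_theft(nums):
--     # pass 1: table of running maxima (0-floored) BEFORE each element
--     prefix = []
--     m = 0
--     for x in nums:
--         prefix.append(m)
--         m = m if m > x else x
--     # pass 2: sum the elements that strictly beat their prefix maximum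
--     return sum(x for p, x in zip(prefix, nums) if x > p)
-- ===== Notes on version B (the rewrite author's own statement) =====
-- stated objective: alternative
-- what changed: A fuses running-maximum tracking and summing into one indexed loop with mutable state; B first builds the 0-floored prefix-maximum table in one pass, then sums in a separate zip/filter pass the elements strictly above their prefix maximum.
import Mathlib
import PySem

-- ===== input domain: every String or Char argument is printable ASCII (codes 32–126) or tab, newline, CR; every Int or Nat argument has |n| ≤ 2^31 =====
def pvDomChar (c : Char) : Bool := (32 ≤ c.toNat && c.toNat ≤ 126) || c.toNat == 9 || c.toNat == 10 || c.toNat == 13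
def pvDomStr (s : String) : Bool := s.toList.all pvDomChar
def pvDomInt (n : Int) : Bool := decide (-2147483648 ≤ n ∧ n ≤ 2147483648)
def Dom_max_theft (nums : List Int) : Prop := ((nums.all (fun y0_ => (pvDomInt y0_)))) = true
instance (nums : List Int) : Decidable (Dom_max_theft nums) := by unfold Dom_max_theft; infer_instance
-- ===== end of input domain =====

-- ===== PORT A =====
-- A: indexed loop over range(0, len(nums)); 'i += 1' in the body rebinds the loop
-- variable and is a no-op in Python, so it is not ported.
def max_theft (nums : List Int) : Int :=
  ((PySem.List.pyRange 0 (PySem.List.len nums) 1).foldl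
    (fun (st : Int × Int) i =>
      if st.1 < PySem.List.pyGetD nums i 0 then
        (PySem.List.pyGetD nums i 0, st.2 + PySem.List.pyGetD nums i 0)
      else st) (0, 0)).2

-- ===== PORT B =====
-- B: pass 1 builds the 0-floored prefix-maximum table; pass 2 sums elements
-- strictly above their prefix maximum.
def mkPrefix (m : Int) : List Int → List Int
  | [] => []
  | x :: xs => m :: mkPrefix (if m > x then m else x) xs

def max_theft_alt (nums : List Int) : Int :=
  ((((mkPrefix 0 nums).zip nums).filter (fun px => px.2 > px.1)).map (fun px => px.2)).sum

-- ===== PRECONDITION & SPEC =====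
def Spec_max_theft (nums : List Int) (out : Int) : Prop := out = max_theft_alt nums
instance (nums : List Int) (out : Int) : Decidable (Spec_max_theft nums out) := by unfold Spec_max_theft; infer_instance

-- ===== CLAIM (what is proved, stated in full; the proofs are below) =====
def Claim_equal_max_theft : Prop := ∀ (nums : List Int), Dom_max_theft nums → Spec_max_theft nums (max_theft nums)

-- ===== LEMMAS AND PROOFS =====

-- ===== VERDICT included below
-- =====
theorem step_lemma (xs : List Int) : ∀ (m s : Int),
    (xs.foldl (fun (st : Int × Int) x =>
        if st.1 < x then (x, st.2 + x) else st) (m, s)).2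
      = s + ((((mkPrefix m xs).zip xs).filter (fun px => px.2 > px.1)).map (fun px => px.2)).sum := by
  induction xs with
  | nil => simp [mkPrefix]
  | cons x xs ih =>
    intro m s
    by_cases h : m < x
    · have h2 : (if m > x then m else x) = x := by omega
      simp [mkPrefix, h, h2, List.foldl_cons, ih]
      ring
    · have h2 : (if m > x then m else x) = m := by omega
      have h3 : ¬ (x > m) := by omega
      simp [mkPrefix, h, h2, List.foldl_cons, ih]

-- ===== VERDICT (by name: the statement is the Claim_ definition above) =====
theorem max_theft_spec : Claim_equal_max_theft := by
  intro nums _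
  unfold Spec_max_theft max_theft max_theft_alt
  rw [show (PySem.List.len nums) = ((nums.length : Int)) from rfl,
      PySem.List.foldl_pyRange_zero_pyGetD' nums 0
        (fun (st : Int × Int) x => if st.1 < x then (x, st.2 + x) else st) (0,0)]
  rw [step_lemma nums 0 0]
  ring
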